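-- pv_equiv track=rewrite | github.com/JangDongHo/Dongho-Algorithm-Note | DFS, BFS/BFS/양과 늑대.py | solution
-- ===== SOURCE A (Python) =====
-- from collections import deque
--
-- def solution(info, edges):
--     N = len(info)
--
--     adj_list = [[] for _ in range(N)]
--     for a, b in edges:
--         adj_list[a].append(b)
--         adj_list[b].append(a)
--
--     visited = set()
--
--     ans = 0
--     q = deque()
--     q.append(({0}, 1, 0)) # (상태 집합, 양의 개수, 늑대의 개수)
--
--     while q:
--         cur_set, cur_sheep, cur_wolf = q.popleft()
--         ans = max(ans, cur_sheep)
--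
--         nxt_nodes = set()
--         for node in cur_set:
--             for adj_node in adj_list[node]:
--                 if adj_node not in cur_set:
--                     nxt_nodes.add(adj_node)
--
--         for node in nxt_nodes:
--             nxt_set = cur_set | {node}
--             if info[node] == 0:
--                 if tuple(sorted(nxt_set)) not in visited:
--                     q.append((nxt_set, cur_sheep + 1, cur_wolf))
--                     visited.add(tuple(sorted(nxt_set)))
--             elif info[node] == 1 and cur_sheep > cur_wolf + 1:
--                 if tuple(sorted(nxt_set)) not in visited:
--                     q.append((nxt_set, cur_sheep, cur_wolf + 1))
--                     visited.add(tuple(sorted(nxt_set)))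
--
--     return ans
-- ===== SOURCE B (Python) =====
-- def solution(info, edges):
--     N = len(info)
--
--     adj_list = [[] for _ in range(N)]
--     for a, b in edges:
--         adj_list[a].append(b)
--         adj_list[b].append(a)
--
--     best = 0
--     seen = set()
--
--     def dfs(chosen, sheep, wolf):
--         nonlocal best
--         key = frozenset(chosen)
--         if key in seen:
--             return
--         seen.add(key)
--         best = max(best, sheep)
--         for u in {u for v in chosen for u in adj_list[v] if u not in chosen}:
--             if info[u] == 0:
--                 dfs(chosen | {u}, sheep + 1, wolf)
--             elif info[u] == 1 and sheep > wolf + 1: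
--                 dfs(chosen | {u}, sheep, wolf + 1)
--
--     dfs({0}, 1, 0)
--     return best
-- ===== Notes on version B (the rewrite author's own statement) =====
-- stated objective: alternative
-- what changed: Replaced the iterative BFS with a FIFO deque of (set, sheep, wolf) states and a global sorted-tuple visited set by a recursive depth-first search that threads a nonlocal running maximum and prunes repeated states by frozenset at call entry instead of at enqueue time.
import Mathlib
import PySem

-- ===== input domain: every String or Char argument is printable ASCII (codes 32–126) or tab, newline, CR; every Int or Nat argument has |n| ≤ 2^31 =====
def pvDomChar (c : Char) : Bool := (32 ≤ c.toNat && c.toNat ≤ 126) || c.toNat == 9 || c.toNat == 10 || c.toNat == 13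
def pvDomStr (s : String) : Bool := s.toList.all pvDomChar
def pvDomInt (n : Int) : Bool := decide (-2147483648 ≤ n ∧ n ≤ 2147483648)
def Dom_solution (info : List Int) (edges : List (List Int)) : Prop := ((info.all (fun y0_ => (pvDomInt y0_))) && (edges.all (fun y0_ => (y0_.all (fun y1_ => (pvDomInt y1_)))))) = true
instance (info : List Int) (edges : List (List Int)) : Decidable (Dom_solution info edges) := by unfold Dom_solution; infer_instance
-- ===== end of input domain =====

-- B replaces A's iterative BFS (FIFO queue of states, global sorted-tuple visited set)
-- by a recursive depth-first search threading a running maximum, with frozenset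
-- deduplication at call entry; objective: alternative decomposition, same exact answer.

-- ===== PORT A =====

-- A: the adjacency list built by `for a, b in edges: adj_list[a].append(b); adj_list[b].append(a)`
def pvBuildAdj (N : Nat) (edges : List (List Int)) : List (List Int) :=
  edges.foldl (fun adj e =>
    match e with
    | [a, b] =>
      let adj1 := PySem.List.pySetD adj a (PySem.List.pyGetD adj a [] ++ [b])
      PySem.List.pySetD adj1 b (PySem.List.pyGetD adj1 b [] ++ [a])
    | _ => adj) (List.replicate N [])

-- A: `nxt_nodes = set()` built by the double loop over cur_set and adj_list[node]
def pvAnext (adj : List (List Int)) (S : PySem.Set Int) : PySem.Set Int :=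
  S.foldl (fun nx v =>
    (PySem.List.pyGetD adj v []).foldl
      (fun nx u => if PySem.Set.contains S u then nx else PySem.Set.add nx u) nx)
    PySem.Set.empty

-- A: body of `for node in nxt_nodes:` threading (queue, visited)
def pvAenq (info : List Int) (S : PySem.Set Int) (sh wo : Int)
    (acc : List (PySem.Set Int × Int × Int) × List (List Int)) (u : Int) :
    List (PySem.Set Int × Int × Int) × List (List Int) :=
  let T : PySem.Set Int := PySem.Set.union S [u]
  let key : List Int := PySem.List.sorted T (fun x => x)
  if PySem.List.pyGetD info u 0 = 0 then
    if acc.2.contains key then acc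
    else (acc.1 ++ [(T, sh + 1, wo)], acc.2 ++ [key])
  else if PySem.List.pyGetD info u 0 = 1 ∧ wo + 1 < sh then
    if acc.2.contains key then acc
    else (acc.1 ++ [(T, sh, wo + 1)], acc.2 ++ [key])
  else acc

-- A: `while q:` — fueled; the fuel passed by `solution` is provably never exhausted
def pvAloop (info : List Int) (adj : List (List Int)) :
    Nat → List (PySem.Set Int × Int × Int) → List (List Int) → Int → Int
  | 0, _, _, ans => ans
  | _ + 1, [], _, ans => ans
  | f + 1, (S, sh, wo) :: q, vis, ans =>
    let ans' := max ans sh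
    let st := (pvAnext adj S).foldl (pvAenq info S sh wo) (q, vis)
    pvAloop info adj f st.1 st.2 ans'

def solution (info : List Int) (edges : List (List Int)) : Int :=
  let N := info.length
  -- fuel 2^(2N)+1: the loop pops at most 1 + |visited| ≤ 1 + 2^(2N) states
  pvAloop info (pvBuildAdj N edges) (2 ^ (2 * N) + 1) [(PySem.Set.ofList [0], 1, 0)] [] 0

-- ===== PORT B =====

-- B: the candidate set `{u for v in chosen for u in adj_list[v] if u not in chosen}`
def pvBcands (adj : List (List Int)) (S : PySem.Set Int) : PySem.Set Int :=
  PySem.Set.ofList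
    ((S.flatMap (fun v => PySem.List.pyGetD adj v [])).filter
      (fun u => !(PySem.Set.contains S u)))

mutual
-- B: the recursive `dfs` threading (seen, best); fueled — the fuel passed by
-- `solution_alt` is provably never exhausted (the chosen set grows on each call)
def pvDfs (info : List Int) (adj : List (List Int)) :
    Nat → PySem.Set Int → Int → Int → List (PySem.Set Int) → Int →
    List (PySem.Set Int) × Int
  | 0, _, _, _, seen, best => (seen, best)
  | f + 1, S, sh, wo, seen, best =>
    if seen.any (fun K => PySem.Set.equal K S) then (seen, best)
    else pvDfsGo info adj f S sh wo (pvBcands adj S) (seen ++ [S]) (max best sh)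
  termination_by f _ _ _ _ _ => (f, 0)

-- B: the `for u in {...}` loop of dfs
def pvDfsGo (info : List Int) (adj : List (List Int)) :
    Nat → PySem.Set Int → Int → Int → List Int → List (PySem.Set Int) → Int →
    List (PySem.Set Int) × Int
  | _, _, _, _, [], seen, best => (seen, best)
  | f, S, sh, wo, u :: rest, seen, best =>
    if PySem.List.pyGetD info u 0 = 0 then
      let acc := pvDfs info adj f (PySem.Set.union S [u]) (sh + 1) wo seen best
      pvDfsGo info adj f S sh wo rest acc.1 acc.2
    else if PySem.List.pyGetD info u 0 = 1 ∧ wo + 1 < sh then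
      let acc := pvDfs info adj f (PySem.Set.union S [u]) sh (wo + 1) seen best
      pvDfsGo info adj f S sh wo rest acc.1 acc.2
    else
      pvDfsGo info adj f S sh wo rest seen best
  termination_by f _ _ _ L _ _ => (f, L.length + 1)
end

def solution_alt (info : List Int) (edges : List (List Int)) : Int :=
  let N := info.length
  -- fuel 2N+1: the chosen set gains a node on every call and holds at most 2N values
  (pvDfs info (pvBuildAdj N edges) (2 * N + 1) (PySem.Set.ofList [0]) 1 0 [] 0).2

-- ===== PRECONDITION & SPEC =====
-- Pre_ excludes exactly the inputs where Python A raises: an empty info (IndexError on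
-- adj_list[0]), an edge row that is not a pair (ValueError on unpacking), or an edge
-- endpoint outside [-N, N) (IndexError on adj_list[a]); negative endpoints wrap and stay inside.
def Pre_solution (info : List Int) (edges : List (List Int)) : Prop :=
  1 ≤ info.length ∧
    ∀ e ∈ edges, e.length = 2 ∧ ∀ x ∈ e, -(info.length : Int) ≤ x ∧ x < info.length
instance (info : List Int) (edges : List (List Int)) : Decidable (Pre_solution info edges) := by
  unfold Pre_solution; infer_instance

def pvWitness_solution : List Int × List (List Int) := ([0, 0, 1], [[0, 1], [1, 2]])

def Spec_solution (info : List Int) (edges : List (List Int)) (out : Int) : Prop := out = solution_alt info edges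
instance (info : List Int) (edges : List (List Int)) (out : Int) : Decidable (Spec_solution info edges out) := by unfold Spec_solution; infer_instance

-- ===== CLAIM (what is proved, stated in full; the proofs are below) =====
def Claim_equal_solution : Prop := ∀ (info : List Int) (edges : List (List Int)), Dom_solution info edges → Pre_solution info edges → Spec_solution info edges (solution info edges)

-- ===== LEMMAS AND PROOFS =====

-- proof-layer abbreviations
abbrev pvSt : Type := PySem.Set Int × Int × Int
def pvCanon (S : List Int) : List Int := PySem.List.sorted S (fun x => x)
def pvRng (N : Nat) (x : Int) : Prop := -(N : Int) ≤ x ∧ x < N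
def pvVisOK (N : Nat) (k : List Int) : Prop := k.Pairwise (· < ·) ∧ ∀ x ∈ k, pvRng N x
-- the candidate multiset a state's set S generates, before dedup
def pvCands (adj : List (List Int)) (S : PySem.Set Int) : List Int :=
  (S.flatMap (fun v => PySem.List.pyGetD adj v [])).filter (fun u => !(PySem.Set.contains S u))
-- admissibility of adding node u from a state with counters (sh, wo)
def pvCond (info : List Int) (sh wo u : Int) : Prop :=
  PySem.List.pyGetD info u 0 = 0 ∨ (PySem.List.pyGetD info u 0 = 1 ∧ wo + 1 < sh)
-- the state obtained by adding u
def pvChild (info : List Int) (s : pvSt) (u : Int) : pvSt :=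
  if PySem.List.pyGetD info u 0 = 0 then (PySem.Set.union s.1 [u], s.2.1 + 1, s.2.2)
  else (PySem.Set.union s.1 [u], s.2.1, s.2.2 + 1)
-- one admissible expansion step
def pvStep (info : List Int) (adj : List (List Int)) (s t : pvSt) : Prop :=
  ∃ u, u ∈ pvAnext adj s.1 ∧ pvCond info s.2.1 s.2.2 u ∧ t = pvChild info s u
-- chains of expansion steps
inductive pvReach (info : List Int) (adj : List (List Int)) : Nat → pvSt → pvSt → Prop
  | refl (s : pvSt) : pvReach info adj 0 s s
  | head {s s1 t : pvSt} {k : Nat} (h1 : pvStep info adj s s1)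
      (h2 : pvReach info adj k s1 t) : pvReach info adj (k + 1) s t
-- counting predicates: sheep / wolves added after the start node 0
def pvPS (info : List Int) (u : Int) : Bool := decide (¬ u = 0 ∧ PySem.List.pyGetD info u 0 = 0)
def pvPW (info : List Int) (u : Int) : Bool := decide (¬ u = 0 ∧ PySem.List.pyGetD info u 0 = 1)
-- well-formed state: counters are determined by the member set
def pvWF (info : List Int) (N : Nat) (s : pvSt) : Prop :=
  (0 : Int) ∈ s.1 ∧ s.1.Nodup ∧ (∀ x ∈ s.1, pvRng N x) ∧
  s.2.1 = 1 + (s.1.countP (pvPS info) : Int) ∧ s.2.2 = (s.1.countP (pvPW info) : Int)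
-- what one call of B's dfs (or of its inner loop) guarantees
abbrev pvPack (info : List Int) (adj : List (List Int)) (N : Nat)
    (r : List (PySem.Set Int) × Int) (seen : List (PySem.Set Int)) (best : Int)
    (s : pvSt) : Prop :=
  (∃ ext, r.1 = seen ++ ext) ∧ best ≤ r.2
  ∧ (∀ M : Int, best ≤ M → (∀ k t, pvReach info adj k s t → t.2.1 ≤ M) → r.2 ≤ M)
  ∧ (∀ K ∈ r.1, K ∈ seen ∨ ∃ s' : pvSt, pvWF info N s' ∧ (∀ x : Int, x ∈ s'.1 ↔ x ∈ K)
      ∧ s'.2.1 ≤ r.2 ∧ ∀ t, pvStep info adj s' t → ∃ K' ∈ r.1, ∀ x : Int, x ∈ K' ↔ x ∈ t.1)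

lemma pvCanon_perm (S : List Int) : (pvCanon S).Perm S := PySem.List.sorted_perm S (fun x => x) false

lemma pvCanon_mem (S : List Int) (x : Int) : x ∈ pvCanon S ↔ x ∈ S :=
  PySem.List.mem_sorted S (fun x => x) false x

lemma pvCanon_eq_iff {K T : List Int} (hK : K.Nodup) (hT : T.Nodup) :
    pvCanon K = pvCanon T ↔ ∀ x, x ∈ K ↔ x ∈ T := by
  rw [pvCanon, pvCanon, PySem.List.sorted_id_eq_sorted_id_iff_perm]
  exact List.perm_ext_iff_of_nodup hK hT

lemma pvCanon_visOK {N : Nat} {K : List Int} (hnd : K.Nodup) (hr : ∀ x ∈ K, pvRng N x) :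
    pvVisOK N (pvCanon K) := by
  constructor
  · have hle : (pvCanon K).Pairwise (fun a b : Int => a ≤ b) :=
      PySem.List.sorted_pairwise K (fun x => x)
    have hne : (pvCanon K).Nodup := ((pvCanon_perm K).nodup_iff).mpr hnd
    exact (hle.and hne).imp (fun h => lt_of_le_of_ne h.1 h.2)
  · intro x hx; exact hr x ((pvCanon_mem K x).mp hx)

lemma pvCount {N : Nat} {V : List (List Int)} (hnd : V.Nodup) (h : ∀ k ∈ V, pvVisOK N k) :
    V.length ≤ 2 ^ (2 * N) := by
  classical
  have hinj : ∀ k₁ ∈ V, ∀ k₂ ∈ V, k₁.toFinset = k₂.toFinset → k₁ = k₂ := by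
    intro k₁ h1 k₂ h2 he
    have hs1 := (h k₁ h1).1
    have hs2 := (h k₂ h2).1
    have hn1 : k₁.Nodup := hs1.imp (fun hab => ne_of_lt hab)
    have hn2 : k₂.Nodup := hs2.imp (fun hab => ne_of_lt hab)
    have hperm : k₁.Perm k₂ := (List.perm_ext_iff_of_nodup hn1 hn2).mpr (by
      intro a
      rw [← List.mem_toFinset, ← List.mem_toFinset, he])
    exact List.Perm.eq_of_pairwise (fun a b _ _ h1 h2 => absurd h1 (asymm h2)) hs1 hs2 hperm
  have hmapnd : (V.map List.toFinset).Nodup :=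
    hnd.map_on (fun x hx y hy hxy => hinj x hx y hy hxy)
  have hsub : (V.map List.toFinset).toFinset ⊆ (Finset.Icc (-(N : Int)) ((N : Int) - 1)).powerset := by
    intro s hs
    rcases List.mem_map.mp (List.mem_toFinset.mp hs) with ⟨k, hk, rfl⟩
    refine Finset.mem_powerset.mpr (fun x hx => ?_)
    have hr := (h k hk).2 x (List.mem_toFinset.mp hx)
    exact Finset.mem_Icc.mpr ⟨hr.1, by have := hr.2; omega⟩
  calc V.length = (V.map List.toFinset).length := (List.length_map ..).symm
    _ = (V.map List.toFinset).toFinset.card := (List.toFinset_card_of_nodup hmapnd).symm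
    _ ≤ ((Finset.Icc (-(N : Int)) ((N : Int) - 1)).powerset).card := Finset.card_le_card hsub
    _ = 2 ^ (Finset.Icc (-(N : Int)) ((N : Int) - 1)).card := Finset.card_powerset _
    _ = 2 ^ (2 * N) := by rw [Int.card_Icc]; congr 1; omega

lemma pvMem_pyGetD_adj {adj : List (List Int)} {v x : Int}
    (h : x ∈ PySem.List.pyGetD adj v []) : ∃ l ∈ adj, x ∈ l := by
  rw [PySem.List.pyGetD] at h
  cases hg : PySem.List.pyGet? adj v with
  | none => rw [hg] at h; simp at h
  | some l => rw [hg] at h; exact ⟨l, PySem.List.mem_of_pyGet?_eq_some adj hg, h⟩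

lemma pvMem_pySetD {α : Type} {xs : List α} {i : Int} {v l : α}
    (h : l ∈ PySem.List.pySetD xs i v) : l ∈ xs ∨ l = v := by
  rw [PySem.List.pySetD, PySem.List.pySet?] at h
  cases hk : PySem.List.pyIdx? xs.length i with
  | none => rw [hk] at h; simp at h; exact Or.inl h
  | some k => rw [hk] at h; exact List.mem_or_eq_of_mem_set h

lemma pvBuildAdj_rng (N : Nat) (edges : List (List Int))
    (h : ∀ e ∈ edges, ∀ x ∈ e, pvRng N x) :
    ∀ l ∈ pvBuildAdj N edges, ∀ x ∈ l, pvRng N x := by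
  rw [pvBuildAdj]
  suffices hgen : ∀ (es : List (List Int)) (acc : List (List Int)),
      (∀ e ∈ es, ∀ x ∈ e, pvRng N x) → (∀ l ∈ acc, ∀ x ∈ l, pvRng N x) →
      ∀ l ∈ es.foldl (fun adj e =>
        match e with
        | [a, b] =>
          let adj1 := PySem.List.pySetD adj a (PySem.List.pyGetD adj a [] ++ [b])
          PySem.List.pySetD adj1 b (PySem.List.pyGetD adj1 b [] ++ [a])
        | _ => adj) acc, ∀ x ∈ l, pvRng N x by
    exact hgen edges (List.replicate N []) h (by intro l hl; simp [List.eq_of_mem_replicate hl])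
  intro es
  induction es with
  | nil => intro acc _ hacc; simpa using hacc
  | cons e rest ih =>
      intro acc hes hacc
      refine ih _ (fun e' he' => hes e' (List.mem_cons_of_mem _ he')) ?_
      have he : ∀ x ∈ e, pvRng N x := hes e List.mem_cons_self
      cases e with
      | nil => exact hacc
      | cons a e1 =>
      cases e1 with
      | nil => exact hacc
      | cons b e2 =>
      cases e2 with
      | cons c t => exact hacc
      | nil =>
        intro l hl x hx
        simp only at hl
        rcases pvMem_pySetD hl with hl1 | rfl
        · rcases pvMem_pySetD hl1 with hl2 | rfl
          · exact hacc l hl2 x hx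
          · rcases List.mem_append.mp hx with hx1 | hx1
            · rcases pvMem_pyGetD_adj hx1 with ⟨l2, hl2, hx2⟩
              exact hacc l2 hl2 x hx2
            · simp at hx1; rw [hx1]; exact he b (by simp)
        · rcases List.mem_append.mp hx with hx1 | hx1
          · rcases pvMem_pyGetD_adj hx1 with ⟨l2, hl2, hx2⟩
            rcases pvMem_pySetD hl2 with hl3 | rfl
            · exact hacc l2 hl3 x hx2
            · rcases List.mem_append.mp hx2 with hx3 | hx3
              · rcases pvMem_pyGetD_adj hx3 with ⟨l3, hl3, hx4⟩
                exact hacc l3 hl3 x hx4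
              · simp at hx3; rw [hx3]; exact he b (by simp)
          · simp at hx1; rw [hx1]; exact he a (by simp)

lemma pvAnext_eq (adj : List (List Int)) (S : PySem.Set Int) :
    pvAnext adj S = PySem.Set.ofList (pvCands adj S) := by
  rw [pvAnext, pvCands, PySem.Set.ofList_eq_foldl,
    ← PySem.List.foldl_if_eq_foldl_filter (fun u => !(PySem.Set.contains S u)) PySem.Set.add,
    List.foldl_flatMap]
  congr 1
  funext nx v
  congr 1
  funext nx2 u
  cases PySem.Set.contains S u <;> simp

lemma pvBcands_eq (adj : List (List Int)) (S : PySem.Set Int) :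
    pvBcands adj S = pvAnext adj S := by
  rw [pvAnext_eq]; rfl

lemma pvNodupSnoc {α : Type} {l : List α} {a : α} (h : l.Nodup) (ha : a ∉ l) :
    (l ++ [a]).Nodup := by
  rw [List.nodup_append]
  refine ⟨h, List.nodup_singleton a, ?_⟩
  intro x hx b hbm
  rw [List.mem_singleton] at hbm
  subst hbm
  exact fun he => ha (he ▸ hx)

lemma pvLenBound {N : Nat} {S : List Int} (hnd : S.Nodup) (hr : ∀ x ∈ S, pvRng N x) :
    S.length ≤ 2 * N := by
  classical
  rw [← List.toFinset_card_of_nodup hnd]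
  have hsub : S.toFinset ⊆ Finset.Icc (-(N : Int)) ((N : Int) - 1) := by
    intro x hx
    have hr' := hr x (List.mem_toFinset.mp hx)
    exact Finset.mem_Icc.mpr ⟨hr'.1, by have := hr'.2; omega⟩
  calc S.toFinset.card ≤ (Finset.Icc (-(N : Int)) ((N : Int) - 1)).card :=
        Finset.card_le_card hsub
    _ = 2 * N := by rw [Int.card_Icc]; omega

lemma mem_pvAnext (adj : List (List Int)) (S : PySem.Set Int) (u : Int) :
    u ∈ pvAnext adj S ↔ (∃ v ∈ S, u ∈ PySem.List.pyGetD adj v []) ∧ u ∉ S := by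
  rw [pvAnext_eq, PySem.Set.mem_ofList, pvCands, List.mem_filter, List.mem_flatMap]
  constructor
  · rintro ⟨h1, h2⟩
    refine ⟨h1, fun hin => ?_⟩
    rw [(PySem.Set.contains_iff S u).mpr hin] at h2
    simp at h2
  · rintro ⟨h1, h2⟩
    have hc : PySem.Set.contains S u = false :=
      Bool.eq_false_iff.mpr (fun hc => h2 ((PySem.Set.contains_iff S u).mp hc))
    exact ⟨h1, by rw [hc]; rfl⟩

lemma pvChild_fst (info : List Int) (s : pvSt) (u : Int) :
    (pvChild info s u).1 = PySem.Set.union s.1 [u] := by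
  rw [pvChild]; split_ifs <;> rfl

lemma pvWF_step {info : List Int} {adj : List (List Int)} {N : Nat} {s t : pvSt}
    (hadj : ∀ l ∈ adj, ∀ x ∈ l, pvRng N x)
    (hs : pvWF info N s) (h : pvStep info adj s t) :
    pvWF info N t ∧ t.1.length = s.1.length + 1 := by
  obtain ⟨u, hu, hcond, rfl⟩ := h
  obtain ⟨⟨v, hv, huv⟩, hunot⟩ := (mem_pvAnext adj s.1 u).mp hu
  have hrngu : pvRng N u := by
    obtain ⟨l, hl, hul⟩ := pvMem_pyGetD_adj huv
    exact hadj l hl u hul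
  have hU : PySem.Set.union s.1 [u] = s.1 ++ [u] := PySem.Set.add_of_not_mem hunot
  have hu0 : u ≠ 0 := fun he => hunot (he ▸ hs.1)
  obtain ⟨h0m, hnd, hrng, hsh, hwo⟩ := hs
  have hmem0 : (0 : Int) ∈ s.1 ++ [u] := List.mem_append.mpr (Or.inl h0m)
  have hnd' : (s.1 ++ [u]).Nodup := pvNodupSnoc hnd hunot
  have hrng' : ∀ x ∈ s.1 ++ [u], pvRng N x := by
    intro x hx
    rcases List.mem_append.mp hx with hx | hx
    · exact hrng x hx
    · rw [List.mem_singleton] at hx; subst hx; exact hrngu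
  have hlen : (s.1 ++ [u]).length = s.1.length + 1 := by simp
  by_cases h0 : PySem.List.pyGetD info u 0 = 0
  · have hC : pvChild info s u = (PySem.Set.union s.1 [u], s.2.1 + 1, s.2.2) := by
      rw [pvChild, if_pos h0]
    rw [hC]
    refine ⟨⟨by rw [hU]; exact hmem0, by rw [hU]; exact hnd', by rw [hU]; exact hrng', ?_, ?_⟩,
      by rw [hU]; exact hlen⟩
    · show s.2.1 + 1 = 1 + ((PySem.Set.union s.1 [u]).countP (pvPS info) : Int)
      rw [hU, List.countP_append]
      have : List.countP (pvPS info) [u] = 1 := by simp [pvPS, hu0, h0]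
      rw [this, hsh]; push_cast; ring
    · show s.2.2 = ((PySem.Set.union s.1 [u]).countP (pvPW info) : Int)
      rw [hU, List.countP_append]
      have : List.countP (pvPW info) [u] = 0 := by simp [pvPW, h0]
      rw [this, hwo]; push_cast; ring
  · have h1 : PySem.List.pyGetD info u 0 = 1 := by
      rcases hcond with hc | hc
      · exact absurd hc h0
      · exact hc.1
    have hC : pvChild info s u = (PySem.Set.union s.1 [u], s.2.1, s.2.2 + 1) := by
      rw [pvChild, if_neg h0]
    rw [hC]
    refine ⟨⟨by rw [hU]; exact hmem0, by rw [hU]; exact hnd', by rw [hU]; exact hrng', ?_, ?_⟩,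
      by rw [hU]; exact hlen⟩
    · show s.2.1 = 1 + ((PySem.Set.union s.1 [u]).countP (pvPS info) : Int)
      rw [hU, List.countP_append]
      have : List.countP (pvPS info) [u] = 0 := by simp [pvPS, h1]
      rw [this, hsh]; push_cast; ring
    · show s.2.2 + 1 = ((PySem.Set.union s.1 [u]).countP (pvPW info) : Int)
      rw [hU, List.countP_append]
      have : List.countP (pvPW info) [u] = 1 := by simp [pvPW, hu0, h1]
      rw [this, hwo]; push_cast; ring

lemma pvTwin_sheep {info : List Int} {N : Nat} {s t : pvSt}
    (hs : pvWF info N s) (ht : pvWF info N t)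
    (hmem : ∀ x, x ∈ s.1 ↔ x ∈ t.1) : s.2.1 = t.2.1 ∧ s.2.2 = t.2.2 := by
  have hperm : s.1.Perm t.1 := (List.perm_ext_iff_of_nodup hs.2.1 ht.2.1).mpr hmem
  constructor
  · rw [hs.2.2.2.1, ht.2.2.2.1, hperm.countP_eq]
  · rw [hs.2.2.2.2, ht.2.2.2.2, hperm.countP_eq]

lemma pvTwin_step {info : List Int} {adj : List (List Int)} {N : Nat} {s s' t : pvSt}
    (hs : pvWF info N s) (hs' : pvWF info N s')
    (hmem : ∀ x, x ∈ s.1 ↔ x ∈ s'.1) (h : pvStep info adj s t) :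
    ∃ t', pvStep info adj s' t' ∧ (∀ x, x ∈ t'.1 ↔ x ∈ t.1) := by
  obtain ⟨u, hu, hcond, rfl⟩ := h
  obtain ⟨heq1, heq2⟩ := pvTwin_sheep hs hs' hmem
  obtain ⟨⟨v, hv, huv⟩, hunot⟩ := (mem_pvAnext adj s.1 u).mp hu
  have hunot' : u ∉ s'.1 := fun hin => hunot ((hmem u).mpr hin)
  have hu' : u ∈ pvAnext adj s'.1 :=
    (mem_pvAnext adj s'.1 u).mpr ⟨⟨v, (hmem v).mp hv, huv⟩, hunot'⟩
  have hcond' : pvCond info s'.2.1 s'.2.2 u := by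
    rw [← heq1, ← heq2]; exact hcond
  have e1 : PySem.Set.union s'.1 [u] = s'.1 ++ [u] := PySem.Set.add_of_not_mem hunot'
  have e2 : PySem.Set.union s.1 [u] = s.1 ++ [u] := PySem.Set.add_of_not_mem hunot
  refine ⟨pvChild info s' u, ⟨u, hu', hcond', rfl⟩, ?_⟩
  intro x
  rw [pvChild_fst, pvChild_fst, e1, e2]
  simp only [List.mem_append, List.mem_singleton]
  rw [hmem x]

lemma pvChainBound {info : List Int} {adj : List (List Int)} {N : Nat}
    (hadj : ∀ l ∈ adj, ∀ x ∈ l, pvRng N x) (G : pvSt → Prop)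
    (hWFG : ∀ s, G s → pvWF info N s)
    (hstepG : ∀ s t, G s → pvStep info adj s t → pvWF info N t →
      ∃ s', G s' ∧ ∀ x, x ∈ s'.1 ↔ x ∈ t.1) :
    ∀ {k : Nat} {s t : pvSt}, pvReach info adj k s t →
      ∀ s₀, G s₀ → (∀ x, x ∈ s₀.1 ↔ x ∈ s.1) → pvWF info N s →
      ∃ t', G t' ∧ t'.2.1 = t.2.1 := by
  intro k s t h
  induction h with
  | refl s =>
      intro s₀ hG hmem hwf
      exact ⟨s₀, hG, (pvTwin_sheep (hWFG _ hG) hwf hmem).1⟩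
  | head h1 h2 ih =>
      intro s₀ hG hmem hwf
      obtain ⟨t'', hstep'', hmem''⟩ :=
        pvTwin_step hwf (hWFG _ hG) (fun x => (hmem x).symm) h1
      have hwft'' : pvWF info N t'' :=
        (pvWF_step hadj (hWFG _ hG) hstep'').1
      obtain ⟨s1', hG1, hmem1⟩ := hstepG _ _ hG hstep'' hwft''
      have hwf1 : pvWF info N _ := (pvWF_step hadj hwf h1).1
      exact ih s1' hG1 (fun x => (hmem1 x).trans (hmem'' x)) hwf1

-- fold analysis of A's enqueue loop
lemma pvAFold (info : List Int) (N : Nat) (S : PySem.Set Int) (sh wo : Int)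
    (hS : S.Nodup) (hSr : ∀ x ∈ S, pvRng N x) :
    ∀ (L : List Int) (q : List pvSt) (vis : List (List Int)),
    (∀ u ∈ L, u ∉ S ∧ pvRng N u) → vis.Nodup →
    ∃ new : List pvSt,
      L.foldl (pvAenq info S sh wo) (q, vis) = (q ++ new, vis ++ new.map (fun t => pvCanon t.1))
      ∧ (∀ t ∈ new, ∃ u ∈ L, pvCond info sh wo u ∧ t = pvChild info (S, sh, wo) u)
      ∧ (vis ++ new.map (fun t => pvCanon t.1)).Nodup
      ∧ (∀ t ∈ new, pvVisOK N (pvCanon t.1))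
      ∧ (∀ u ∈ L, pvCond info sh wo u →
          pvCanon (PySem.Set.union S [u]) ∈ vis ++ new.map (fun t => pvCanon t.1)) := by
  intro L
  induction L with
  | nil =>
      intro q vis _ hvnd
      exact ⟨[], by simp, by simp, by simpa using hvnd, by simp, by simp⟩
  | cons u rest ih =>
      intro q vis hL hvnd
      obtain ⟨huS, hur⟩ := hL u List.mem_cons_self
      have hrest : ∀ u' ∈ rest, u' ∉ S ∧ pvRng N u' :=
        fun u' h => hL u' (List.mem_cons_of_mem _ h)
      have hU : PySem.Set.union S [u] = S ++ [u] := PySem.Set.add_of_not_mem huS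
      have hkeyOK : pvVisOK N (pvCanon (PySem.Set.union S [u])) := by
        rw [hU]
        refine pvCanon_visOK (pvNodupSnoc hS huS) ?_
        intro x hx
        rcases List.mem_append.mp hx with hx | hx
        · exact hSr x hx
        · rw [List.mem_singleton] at hx; subst hx; exact hur
      have hfold1 : (u :: rest).foldl (pvAenq info S sh wo) (q, vis)
          = rest.foldl (pvAenq info S sh wo) (pvAenq info S sh wo (q, vis) u) := rfl
      by_cases h0 : PySem.List.pyGetD info u 0 = 0
      · by_cases hc : vis.contains (pvCanon (PySem.Set.union S [u]))
        · have hstep : pvAenq info S sh wo (q, vis) u = (q, vis) := by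
            rw [pvAenq]; simp only [if_pos h0]
            rw [if_pos (by exact hc)]
          obtain ⟨new, h1, h2, h3, h4, h5⟩ := ih q vis hrest hvnd
          refine ⟨new, by rw [hfold1, hstep]; exact h1, ?_, h3, h4, ?_⟩
          · intro t ht
            obtain ⟨u', hu', hrest'⟩ := h2 t ht
            exact ⟨u', List.mem_cons_of_mem _ hu', hrest'⟩
          · intro u' hu' hcond'
            rcases List.mem_cons.mp hu' with rfl | hu'
            · exact List.mem_append.mpr (Or.inl (List.contains_iff_mem.mp hc))
            · exact h5 u' hu' hcond'
        · have hstep : pvAenq info S sh wo (q, vis) u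
              = (q ++ [(PySem.Set.union S [u], sh + 1, wo)],
                 vis ++ [pvCanon (PySem.Set.union S [u])]) := by
            rw [pvAenq]; simp only [if_pos h0]
            rw [if_neg (by exact hc)]; rfl
          have hvnd' : (vis ++ [pvCanon (PySem.Set.union S [u])]).Nodup :=
            pvNodupSnoc hvnd (fun hm => hc (List.contains_iff_mem.mpr hm))
          obtain ⟨new, h1, h2, h3, h4, h5⟩ :=
            ih (q ++ [(PySem.Set.union S [u], sh + 1, wo)])
               (vis ++ [pvCanon (PySem.Set.union S [u])]) hrest hvnd'
          have hchild : (PySem.Set.union S [u], sh + 1, wo) = pvChild info (S, sh, wo) u := by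
            rw [pvChild, if_pos h0]
          refine ⟨(PySem.Set.union S [u], sh + 1, wo) :: new, ?_, ?_, ?_, ?_, ?_⟩
          · rw [hfold1, hstep, h1]; simp
          · intro t ht
            rcases List.mem_cons.mp ht with rfl | ht
            · exact ⟨u, List.mem_cons_self, Or.inl h0, hchild⟩
            · obtain ⟨u', hu', hrest'⟩ := h2 t ht
              exact ⟨u', List.mem_cons_of_mem _ hu', hrest'⟩
          · have := h3; simpa [List.append_assoc] using this
          · intro t ht
            rcases List.mem_cons.mp ht with rfl | ht
            · exact hkeyOK
            · exact h4 t ht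
          · intro u' hu' hcond'
            rcases List.mem_cons.mp hu' with rfl | hu'
            · exact List.mem_append.mpr (Or.inr (List.mem_map.mpr
                ⟨(PySem.Set.union S [u'], sh + 1, wo), List.mem_cons_self, rfl⟩))
            · have h6 := h5 u' hu' hcond'
              simpa [List.append_assoc] using h6
      · by_cases h1' : PySem.List.pyGetD info u 0 = 1 ∧ wo + 1 < sh
        · by_cases hc : vis.contains (pvCanon (PySem.Set.union S [u]))
          · have hstep : pvAenq info S sh wo (q, vis) u = (q, vis) := by
              rw [pvAenq]; simp only [if_neg h0, if_pos h1']
              rw [if_pos (by exact hc)]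
            obtain ⟨new, h1, h2, h3, h4, h5⟩ := ih q vis hrest hvnd
            refine ⟨new, by rw [hfold1, hstep]; exact h1, ?_, h3, h4, ?_⟩
            · intro t ht
              obtain ⟨u', hu', hrest'⟩ := h2 t ht
              exact ⟨u', List.mem_cons_of_mem _ hu', hrest'⟩
            · intro u' hu' hcond'
              rcases List.mem_cons.mp hu' with rfl | hu'
              · exact List.mem_append.mpr (Or.inl (List.contains_iff_mem.mp hc))
              · exact h5 u' hu' hcond'
          · have hstep : pvAenq info S sh wo (q, vis) u
                = (q ++ [(PySem.Set.union S [u], sh, wo + 1)],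
                   vis ++ [pvCanon (PySem.Set.union S [u])]) := by
              rw [pvAenq]; simp only [if_neg h0, if_pos h1']
              rw [if_neg (by exact hc)]; rfl
            have hvnd' : (vis ++ [pvCanon (PySem.Set.union S [u])]).Nodup :=
              pvNodupSnoc hvnd (fun hm => hc (List.contains_iff_mem.mpr hm))
            obtain ⟨new, h1, h2, h3, h4, h5⟩ :=
              ih (q ++ [(PySem.Set.union S [u], sh, wo + 1)])
                 (vis ++ [pvCanon (PySem.Set.union S [u])]) hrest hvnd'
            have hchild : (PySem.Set.union S [u], sh, wo + 1) = pvChild info (S, sh, wo) u := by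
              rw [pvChild, if_neg h0]
            refine ⟨(PySem.Set.union S [u], sh, wo + 1) :: new, ?_, ?_, ?_, ?_, ?_⟩
            · rw [hfold1, hstep, h1]; simp
            · intro t ht
              rcases List.mem_cons.mp ht with rfl | ht
              · exact ⟨u, List.mem_cons_self, Or.inr h1', hchild⟩
              · obtain ⟨u', hu', hrest'⟩ := h2 t ht
                exact ⟨u', List.mem_cons_of_mem _ hu', hrest'⟩
            · have := h3; simpa [List.append_assoc] using this
            · intro t ht
              rcases List.mem_cons.mp ht with rfl | ht
              · exact hkeyOK
              · exact h4 t ht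
            · intro u' hu' hcond'
              rcases List.mem_cons.mp hu' with rfl | hu'
              · exact List.mem_append.mpr (Or.inr (List.mem_map.mpr
                  ⟨(PySem.Set.union S [u'], sh, wo + 1), List.mem_cons_self, rfl⟩))
              · have h6 := h5 u' hu' hcond'
                simpa [List.append_assoc] using h6
        · have hstep : pvAenq info S sh wo (q, vis) u = (q, vis) := by
            rw [pvAenq]; simp only [if_neg h0, if_neg h1']
          obtain ⟨new, h1, h2, h3, h4, h5⟩ := ih q vis hrest hvnd
          refine ⟨new, by rw [hfold1, hstep]; exact h1, ?_, h3, h4, ?_⟩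
          · intro t ht
            obtain ⟨u', hu', hrest'⟩ := h2 t ht
            exact ⟨u', List.mem_cons_of_mem _ hu', hrest'⟩
          · intro u' hu' hcond'
            rcases List.mem_cons.mp hu' with rfl | hu'
            · rcases hcond' with hcx | hcx
              · exact absurd hcx h0
              · exact absurd hcx h1'
            · exact h5 u' hu' hcond'

-- the BFS loop of A: final visited family, lower bound, expansion of every queued
-- state, representatives for every final key, and an upper bound from reachability
lemma pvArun (info : List Int) (adj : List (List Int)) (N : Nat)
    (hadj : ∀ l ∈ adj, ∀ x ∈ l, pvRng N x) :
    ∀ (f : Nat) (q : List pvSt) (vis : List (List Int)) (ans : Int),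
    (∀ s ∈ q, pvWF info N s) → vis.Nodup → (∀ K ∈ vis, pvVisOK N K) →
    q.length + (2 ^ (2 * N) - vis.length) ≤ f →
    ∃ visF : List (List Int),
      (∀ K ∈ vis, K ∈ visF)
      ∧ ans ≤ pvAloop info adj f q vis ans
      ∧ (∀ s ∈ q, s.2.1 ≤ pvAloop info adj f q vis ans ∧
          ∀ t, pvStep info adj s t → pvCanon t.1 ∈ visF)
      ∧ (∀ K ∈ visF, K ∈ vis ∨ ∃ s' : pvSt, pvWF info N s' ∧ pvCanon s'.1 = K ∧
          s'.2.1 ≤ pvAloop info adj f q vis ans ∧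
          ∀ t, pvStep info adj s' t → pvCanon t.1 ∈ visF)
      ∧ (∀ M : Int, ans ≤ M →
          (∀ s ∈ q, ∀ k t, pvReach info adj k s t → t.2.1 ≤ M) →
          pvAloop info adj f q vis ans ≤ M) := by
  intro f
  induction f with
  | zero =>
      intro q vis ans h1 h2 h3 hf
      have hq : q = [] := List.length_eq_zero_iff.mp (by omega)
      subst hq
      refine ⟨vis, fun K hK => hK, ?_, by simp, fun K hK => Or.inl hK, ?_⟩
      · show ans ≤ pvAloop info adj 0 [] vis ans
        simp [pvAloop]
      · intro M hans _
        show pvAloop info adj 0 [] vis ans ≤ M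
        simpa [pvAloop] using hans
  | succ f ihf =>
      intro q vis ans h1 h2 h3 hf
      cases q with
      | nil =>
          refine ⟨vis, fun K hK => hK, ?_, by simp, fun K hK => Or.inl hK, ?_⟩
          · show ans ≤ pvAloop info adj (f + 1) [] vis ans
            simp [pvAloop]
          · intro M hans _
            show pvAloop info adj (f + 1) [] vis ans ≤ M
            simpa [pvAloop] using hans
      | cons s rest =>
          obtain ⟨S, sh, wo⟩ := s
          have hWFs := h1 (S, sh, wo) List.mem_cons_self
          have hL : ∀ u ∈ pvAnext adj S, u ∉ S ∧ pvRng N u := by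
            intro u hu
            obtain ⟨⟨v, hv, huv⟩, hnot⟩ := (mem_pvAnext adj S u).mp hu
            obtain ⟨l, hl, hul⟩ := pvMem_pyGetD_adj huv
            exact ⟨hnot, hadj l hl u hul⟩
          obtain ⟨new, hfold, hsrc, hnd', hok', hcov⟩ :=
            pvAFold info N S sh wo hWFs.2.1 hWFs.2.2.1 (pvAnext adj S) rest vis hL h2
          have hstepnew : ∀ t ∈ new, pvStep info adj (S, sh, wo) t := by
            intro t ht
            obtain ⟨u, hu, hcond, he⟩ := hsrc t ht
            exact ⟨u, hu, hcond, he⟩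
          have hWFq' : ∀ t ∈ rest ++ new, pvWF info N t := by
            intro t ht
            rcases List.mem_append.mp ht with ht | ht
            · exact h1 t (List.mem_cons_of_mem _ ht)
            · exact (pvWF_step hadj hWFs (hstepnew t ht)).1
          have hvok' : ∀ K ∈ vis ++ new.map (fun t => pvCanon t.1), pvVisOK N K := by
            intro K hK
            rcases List.mem_append.mp hK with hK | hK
            · exact h3 K hK
            · obtain ⟨t, ht, rfl⟩ := List.mem_map.mp hK
              exact hok' t ht
          have hb1 : vis.length ≤ 2 ^ (2 * N) := pvCount h2 h3
          have hb2 : (vis ++ new.map (fun t => pvCanon t.1)).length ≤ 2 ^ (2 * N) :=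
            pvCount hnd' hvok'
          have hf' : (rest ++ new).length
              + (2 ^ (2 * N) - (vis ++ new.map (fun t => pvCanon t.1)).length) ≤ f := by
            simp only [List.length_append, List.length_map, List.length_cons] at *
            omega
          obtain ⟨visF, ia, ib, ic, id, ie⟩ :=
            ihf (rest ++ new) (vis ++ new.map (fun t => pvCanon t.1)) (max ans sh)
              hWFq' hnd' hvok' hf'
          have hunf : pvAloop info adj (f + 1) ((S, sh, wo) :: rest) vis ans
              = pvAloop info adj f (rest ++ new)
                  (vis ++ new.map (fun t => pvCanon t.1)) (max ans sh) := by
            show pvAloop info adj f ((pvAnext adj S).foldl (pvAenq info S sh wo) (rest, vis)).1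
              ((pvAnext adj S).foldl (pvAenq info S sh wo) (rest, vis)).2 (max ans sh) = _
            rw [hfold]
          rw [hunf]
          refine ⟨visF, ?_, le_trans (le_max_left _ _) ib, ?_, ?_, ?_⟩
          · intro K hK; exact ia K (List.mem_append.mpr (Or.inl hK))
          · intro s' hs'
            rcases List.mem_cons.mp hs' with rfl | hs'
            · refine ⟨le_trans (le_max_right _ _) ib, ?_⟩
              intro t ht
              obtain ⟨u, hu, hcond, he⟩ := ht
              have hmem := hcov u hu hcond
              have hck : pvCanon t.1 = pvCanon (PySem.Set.union S [u]) := by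
                rw [he, pvChild_fst]
              rw [hck]
              exact ia _ hmem
            · exact ic s' (List.mem_append.mpr (Or.inl hs'))
          · intro K hK
            rcases id K hK with hKv | hrep
            · rcases List.mem_append.mp hKv with hKv | hKv
              · exact Or.inl hKv
              · obtain ⟨t, ht, rfl⟩ := List.mem_map.mp hKv
                exact Or.inr ⟨t, (pvWF_step hadj hWFs (hstepnew t ht)).1, rfl,
                  (ic t (List.mem_append.mpr (Or.inr ht))).1,
                  (ic t (List.mem_append.mpr (Or.inr ht))).2⟩
            · exact Or.inr hrep
          · intro M hans hq
            refine ie M (max_le hans ?_) ?_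
            · exact hq (S, sh, wo) List.mem_cons_self 0 (S, sh, wo) (pvReach.refl _)
            · intro s' hs' k t ht
              rcases List.mem_append.mp hs' with hs' | hs'
              · exact hq s' (List.mem_cons_of_mem _ hs') k t ht
              · exact hq (S, sh, wo) List.mem_cons_self (k + 1) t
                  (pvReach.head (hstepnew s' hs') ht)

-- the recursive DFS of B: everything one call guarantees
lemma pvDrun (info : List Int) (adj : List (List Int)) (N : Nat)
    (hadj : ∀ l ∈ adj, ∀ x ∈ l, pvRng N x) :
    ∀ f : Nat,
      (∀ (S : PySem.Set Int) (sh wo : Int) (seen : List (PySem.Set Int)) (best : Int),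
        pvWF info N (S, sh, wo) → 2 * N + 2 ≤ f + S.length →
        pvPack info adj N (pvDfs info adj f S sh wo seen best) seen best (S, sh, wo)
        ∧ ∃ K ∈ (pvDfs info adj f S sh wo seen best).1, ∀ x : Int, x ∈ K ↔ x ∈ S)
      ∧ (∀ (S : PySem.Set Int) (sh wo : Int) (L : List Int) (seen : List (PySem.Set Int)) (best : Int),
        pvWF info N (S, sh, wo) → 2 * N + 1 ≤ f + S.length →
        (∀ u ∈ L, u ∈ pvAnext adj S) →
        pvPack info adj N (pvDfsGo info adj f S sh wo L seen best) seen best (S, sh, wo)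
        ∧ (∀ u ∈ L, pvCond info sh wo u →
            ∃ K ∈ (pvDfsGo info adj f S sh wo L seen best).1,
              ∀ x : Int, x ∈ K ↔ x ∈ PySem.Set.union S [u])) := by
  intro f
  induction f with
  | zero =>
      constructor
      · intro S sh wo seen best hWF hfuel
        have hb : S.length ≤ 2 * N := pvLenBound hWF.2.1 hWF.2.2.1
        exact absurd hfuel (by omega)
      · intro S sh wo L seen best hWF hfuel hL
        have hb : S.length ≤ 2 * N := pvLenBound hWF.2.1 hWF.2.2.1
        exact absurd hfuel (by omega)
  | succ f ihf =>
      have hDfs : ∀ (S : PySem.Set Int) (sh wo : Int) (seen : List (PySem.Set Int)) (best : Int),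
          pvWF info N (S, sh, wo) → 2 * N + 2 ≤ (f + 1) + S.length →
          pvPack info adj N (pvDfs info adj (f + 1) S sh wo seen best) seen best (S, sh, wo)
          ∧ ∃ K ∈ (pvDfs info adj (f + 1) S sh wo seen best).1, ∀ x : Int, x ∈ K ↔ x ∈ S := by
        intro S sh wo seen best hWF hfuel
        by_cases hany : (seen.any fun K => PySem.Set.equal K S) = true
        · have hr : pvDfs info adj (f + 1) S sh wo seen best = (seen, best) := by
            rw [pvDfs, if_pos hany]
          rw [hr]
          refine ⟨⟨⟨[], by simp⟩, le_refl _, fun M hb _ => hb, fun K hK => Or.inl hK⟩, ?_⟩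
          obtain ⟨K, hK, hEq⟩ := List.any_eq_true.mp hany
          exact ⟨K, hK, fun x => (PySem.Set.equal_iff K S).mp hEq x⟩
        · have hr : pvDfs info adj (f + 1) S sh wo seen best
              = pvDfsGo info adj f S sh wo (pvBcands adj S) (seen ++ [S]) (max best sh) := by
            rw [pvDfs, if_neg hany]
          rw [hr]
          obtain ⟨⟨⟨ext, hext⟩, hc1, hc2, hc3⟩, hc5⟩ :=
            ihf.2 S sh wo (pvBcands adj S) (seen ++ [S]) (max best sh) hWF
              (by omega) (fun u hu => by rwa [pvBcands_eq] at hu)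
          refine ⟨⟨⟨S :: ext, by rw [hext]; simp⟩, le_trans (le_max_left _ _) hc1, ?_, ?_⟩, ?_⟩
          · intro M hb hrM
            exact hc2 M (max_le hb (hrM 0 (S, sh, wo) (pvReach.refl _))) hrM
          · intro K hK
            rcases hc3 K hK with hKs | hrep
            · rcases List.mem_append.mp hKs with hKs | hKs
              · exact Or.inl hKs
              · rw [List.mem_singleton] at hKs
                refine Or.inr ⟨(S, sh, wo), hWF, fun x => by rw [hKs],
                  le_trans (le_max_right _ _) hc1, ?_⟩
                intro t ht
                obtain ⟨u, hu, hcond, he⟩ := ht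
                obtain ⟨K', hK', hm⟩ := hc5 u (by rw [pvBcands_eq]; exact hu) hcond
                refine ⟨K', hK', fun x => ?_⟩
                rw [he, pvChild_fst]
                exact hm x
            · exact Or.inr hrep
          · exact ⟨S, by rw [hext]; simp, fun x => Iff.rfl⟩
      refine ⟨hDfs, ?_⟩
      intro S sh wo L
      induction L with
      | nil =>
          intro seen best hWF hfuel hL
          have hr : pvDfsGo info adj (f + 1) S sh wo [] seen best = (seen, best) := by
            rw [pvDfsGo]
          rw [hr]
          exact ⟨⟨⟨[], by simp⟩, le_refl _, fun M hb _ => hb, fun K hK => Or.inl hK⟩,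
            fun u hu => nomatch hu⟩
      | cons u rest ihL =>
          intro seen best hWF hfuel hL
          have hu : u ∈ pvAnext adj S := hL u List.mem_cons_self
          have hrest : ∀ u' ∈ rest, u' ∈ pvAnext adj S :=
            fun u' h => hL u' (List.mem_cons_of_mem _ h)
          by_cases h0 : PySem.List.pyGetD info u 0 = 0
          · have hstep : pvStep info adj (S, sh, wo) (PySem.Set.union S [u], sh + 1, wo) :=
              ⟨u, hu, Or.inl h0, by rw [pvChild, if_pos h0]⟩
            have hchild := pvWF_step hadj hWF hstep
            have hlen : (PySem.Set.union S [u]).length = S.length + 1 := hchild.2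
            obtain ⟨⟨⟨ext1, he1⟩, hd1, hd2, hd3⟩, hd4⟩ :=
              hDfs (PySem.Set.union S [u]) (sh + 1) wo seen best hchild.1 (by omega)
            have hr : pvDfsGo info adj (f + 1) S sh wo (u :: rest) seen best
                = pvDfsGo info adj (f + 1) S sh wo rest
                    (pvDfs info adj (f + 1) (PySem.Set.union S [u]) (sh + 1) wo seen best).1
                    (pvDfs info adj (f + 1) (PySem.Set.union S [u]) (sh + 1) wo seen best).2 := by
              rw [pvDfsGo, if_pos h0]
            obtain ⟨⟨⟨ext2, he2⟩, hg1, hg2, hg3⟩, hg5⟩ :=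
              ihL (pvDfs info adj (f + 1) (PySem.Set.union S [u]) (sh + 1) wo seen best).1
                (pvDfs info adj (f + 1) (PySem.Set.union S [u]) (sh + 1) wo seen best).2
                hWF hfuel hrest
            rw [hr]
            refine ⟨⟨⟨ext1 ++ ext2, by rw [he2, he1, List.append_assoc]⟩,
              le_trans hd1 hg1, ?_, ?_⟩, ?_⟩
            · intro M hb hrM
              refine hg2 M (hd2 M hb ?_) hrM
              intro k t ht
              exact hrM (k + 1) t (pvReach.head hstep ht)
            · intro K hK
              rcases hg3 K hK with hKA | hrep
              · rcases hd3 K hKA with hKs | ⟨s', hw, hm, hle, hcovA⟩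
                · exact Or.inl hKs
                · refine Or.inr ⟨s', hw, hm, le_trans hle hg1, ?_⟩
                  intro t ht
                  obtain ⟨K', hK', hm'⟩ := hcovA t ht
                  exact ⟨K', by rw [he2]; exact List.mem_append.mpr (Or.inl hK'), hm'⟩
              · exact Or.inr hrep
            · intro u' hu' hcond'
              rcases List.mem_cons.mp hu' with rfl | hu'
              · obtain ⟨K, hK, hm⟩ := hd4
                exact ⟨K, by rw [he2]; exact List.mem_append.mpr (Or.inl hK), hm⟩
              · exact hg5 u' hu' hcond'
          · by_cases h1' : PySem.List.pyGetD info u 0 = 1 ∧ wo + 1 < sh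
            · have hstep : pvStep info adj (S, sh, wo) (PySem.Set.union S [u], sh, wo + 1) :=
                ⟨u, hu, Or.inr h1', by rw [pvChild, if_neg h0]⟩
              have hchild := pvWF_step hadj hWF hstep
              have hlen : (PySem.Set.union S [u]).length = S.length + 1 := hchild.2
              obtain ⟨⟨⟨ext1, he1⟩, hd1, hd2, hd3⟩, hd4⟩ :=
                hDfs (PySem.Set.union S [u]) sh (wo + 1) seen best hchild.1 (by omega)
              have hr : pvDfsGo info adj (f + 1) S sh wo (u :: rest) seen best
                  = pvDfsGo info adj (f + 1) S sh wo rest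
                      (pvDfs info adj (f + 1) (PySem.Set.union S [u]) sh (wo + 1) seen best).1
                      (pvDfs info adj (f + 1) (PySem.Set.union S [u]) sh (wo + 1) seen best).2 := by
                rw [pvDfsGo, if_neg h0, if_pos h1']
              obtain ⟨⟨⟨ext2, he2⟩, hg1, hg2, hg3⟩, hg5⟩ :=
                ihL (pvDfs info adj (f + 1) (PySem.Set.union S [u]) sh (wo + 1) seen best).1
                  (pvDfs info adj (f + 1) (PySem.Set.union S [u]) sh (wo + 1) seen best).2
                  hWF hfuel hrest
              rw [hr]
              refine ⟨⟨⟨ext1 ++ ext2, by rw [he2, he1, List.append_assoc]⟩,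
                le_trans hd1 hg1, ?_, ?_⟩, ?_⟩
              · intro M hb hrM
                refine hg2 M (hd2 M hb ?_) hrM
                intro k t ht
                exact hrM (k + 1) t (pvReach.head hstep ht)
              · intro K hK
                rcases hg3 K hK with hKA | hrep
                · rcases hd3 K hKA with hKs | ⟨s', hw, hm, hle, hcovA⟩
                  · exact Or.inl hKs
                  · refine Or.inr ⟨s', hw, hm, le_trans hle hg1, ?_⟩
                    intro t ht
                    obtain ⟨K', hK', hm'⟩ := hcovA t ht
                    exact ⟨K', by rw [he2]; exact List.mem_append.mpr (Or.inl hK'), hm'⟩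
                · exact Or.inr hrep
              · intro u' hu' hcond'
                rcases List.mem_cons.mp hu' with rfl | hu'
                · obtain ⟨K, hK, hm⟩ := hd4
                  exact ⟨K, by rw [he2]; exact List.mem_append.mpr (Or.inl hK), hm⟩
                · exact hg5 u' hu' hcond'
            · have hr : pvDfsGo info adj (f + 1) S sh wo (u :: rest) seen best
                  = pvDfsGo info adj (f + 1) S sh wo rest seen best := by
                rw [pvDfsGo, if_neg h0, if_neg h1']
              obtain ⟨hpk, hc5r⟩ := ihL seen best hWF hfuel hrest
              rw [hr]
              refine ⟨hpk, ?_⟩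
              intro u' hu' hcond'
              rcases List.mem_cons.mp hu' with rfl | hu'
              · rcases hcond' with hcx | hcx
                · exact absurd hcx h0
                · exact absurd hcx h1'
              · exact hc5r u' hu' hcond'

-- ===== VERDICT (by name: the statement is the Claim_ definition above) =====
theorem solution_spec : Claim_equal_solution := by
  intro info edges _hdom hpre
  obtain ⟨hN, hedges⟩ := hpre
  have hadj : ∀ l ∈ pvBuildAdj info.length edges, ∀ x ∈ l, pvRng info.length x :=
    pvBuildAdj_rng info.length edges (fun e he x hx => (hedges e he).2 x hx)
  have hS0 : (PySem.Set.ofList [(0 : Int)] : PySem.Set Int) = [0] := rfl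
  have hN0 : (0 : Int) < (info.length : Int) := by exact_mod_cast hN
  have hWF0 : pvWF info info.length
      ((PySem.Set.ofList [(0 : Int)] : PySem.Set Int), (1 : Int), (0 : Int)) := by
    refine ⟨?_, ?_, ?_, ?_, ?_⟩
    · show (0 : Int) ∈ (PySem.Set.ofList [(0 : Int)] : PySem.Set Int)
      rw [hS0]; exact List.mem_singleton.mpr rfl
    · show (PySem.Set.ofList [(0 : Int)] : PySem.Set Int).Nodup
      rw [hS0]; exact List.nodup_singleton _
    · intro x hx
      rw [hS0, List.mem_singleton] at hx
      subst hx
      exact ⟨by omega, hN0⟩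
    · show (1 : Int) = 1 + ((PySem.Set.ofList [(0 : Int)] : PySem.Set Int).countP (pvPS info) : Int)
      rw [hS0]
      have h : List.countP (pvPS info) [(0 : Int)] = 0 := by simp [pvPS]
      rw [h]; simp
    · show (0 : Int) = ((PySem.Set.ofList [(0 : Int)] : PySem.Set Int).countP (pvPW info) : Int)
      rw [hS0]
      have h : List.countP (pvPW info) [(0 : Int)] = 0 := by simp [pvPW]
      rw [h]; simp
  obtain ⟨visF, ia, ib, ic, idd, ie⟩ :=
    pvArun info (pvBuildAdj info.length edges) info.length hadj
      (2 ^ (2 * info.length) + 1)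
      [((PySem.Set.ofList [(0 : Int)] : PySem.Set Int), (1 : Int), (0 : Int))] [] 0
      (by intro s hs; rw [List.mem_singleton] at hs; subst hs; exact hWF0)
      List.nodup_nil (fun K hK => nomatch hK)
      (by simp only [List.length_cons, List.length_nil, Nat.sub_zero]; omega)
  obtain ⟨⟨⟨ext, hext⟩, hc1, hc2, hc3⟩, hc4⟩ :=
    (pvDrun info (pvBuildAdj info.length edges) info.length hadj (2 * info.length + 1)).1
      (PySem.Set.ofList [(0 : Int)]) 1 0 [] 0 hWF0
      (by
        have hl : (PySem.Set.ofList [(0 : Int)] : PySem.Set Int).length = 1 := by rw [hS0]; rfl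
        omega)
  have hstepGA : ∀ s t : pvSt,
      (pvWF info info.length s
        ∧ s.2.1 ≤ pvAloop info (pvBuildAdj info.length edges) (2 ^ (2 * info.length) + 1)
            [((PySem.Set.ofList [(0 : Int)] : PySem.Set Int), (1 : Int), (0 : Int))] [] 0
        ∧ ∀ z, pvStep info (pvBuildAdj info.length edges) s z → pvCanon z.1 ∈ visF) →
      pvStep info (pvBuildAdj info.length edges) s t → pvWF info info.length t →
      ∃ s', (pvWF info info.length s'
        ∧ s'.2.1 ≤ pvAloop info (pvBuildAdj info.length edges) (2 ^ (2 * info.length) + 1)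
            [((PySem.Set.ofList [(0 : Int)] : PySem.Set Int), (1 : Int), (0 : Int))] [] 0
        ∧ ∀ z, pvStep info (pvBuildAdj info.length edges) s' z → pvCanon z.1 ∈ visF)
        ∧ ∀ x, x ∈ s'.1 ↔ x ∈ t.1 := by
    intro s t hs hst hwt
    have hmemF := hs.2.2 t hst
    rcases idd _ hmemF with hin | ⟨s'', hw'', hcan'', hle'', hcov''⟩
    · exact nomatch hin
    · exact ⟨s'', ⟨hw'', hle'', hcov''⟩, (pvCanon_eq_iff hw''.2.1 hwt.2.1).mp hcan''⟩
  have hAcomp : ∀ (k : Nat) (t : pvSt),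
      pvReach info (pvBuildAdj info.length edges) k
        ((PySem.Set.ofList [(0 : Int)] : PySem.Set Int), (1 : Int), (0 : Int)) t →
      t.2.1 ≤ pvAloop info (pvBuildAdj info.length edges) (2 ^ (2 * info.length) + 1)
        [((PySem.Set.ofList [(0 : Int)] : PySem.Set Int), (1 : Int), (0 : Int))] [] 0 := by
    intro k t hreach
    obtain ⟨t', hG', hsheep⟩ := pvChainBound hadj _ (fun s hs => hs.1) hstepGA hreach
      ((PySem.Set.ofList [(0 : Int)] : PySem.Set Int), (1 : Int), (0 : Int))
      ⟨hWF0, (ic _ List.mem_cons_self).1, (ic _ List.mem_cons_self).2⟩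
      (fun x => Iff.rfl) hWF0
    rw [← hsheep]
    exact hG'.2.1
  have hstepGB : ∀ s t : pvSt,
      (pvWF info info.length s
        ∧ s.2.1 ≤ (pvDfs info (pvBuildAdj info.length edges) (2 * info.length + 1)
            (PySem.Set.ofList [(0 : Int)]) 1 0 [] 0).2
        ∧ ∀ z, pvStep info (pvBuildAdj info.length edges) s z →
            ∃ K ∈ (pvDfs info (pvBuildAdj info.length edges) (2 * info.length + 1)
              (PySem.Set.ofList [(0 : Int)]) 1 0 [] 0).1, ∀ x : Int, x ∈ K ↔ x ∈ z.1) →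
      pvStep info (pvBuildAdj info.length edges) s t → pvWF info info.length t →
      ∃ s', (pvWF info info.length s'
        ∧ s'.2.1 ≤ (pvDfs info (pvBuildAdj info.length edges) (2 * info.length + 1)
            (PySem.Set.ofList [(0 : Int)]) 1 0 [] 0).2
        ∧ ∀ z, pvStep info (pvBuildAdj info.length edges) s' z →
            ∃ K ∈ (pvDfs info (pvBuildAdj info.length edges) (2 * info.length + 1)
              (PySem.Set.ofList [(0 : Int)]) 1 0 [] 0).1, ∀ x : Int, x ∈ K ↔ x ∈ z.1)
        ∧ ∀ x, x ∈ s'.1 ↔ x ∈ t.1 := by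
    intro s t hs hst _hwt
    obtain ⟨K', hK', hm'⟩ := hs.2.2 t hst
    rcases hc3 K' hK' with h | ⟨z, hwz, hmz, hlez, hcovz⟩
    · exact nomatch h
    · exact ⟨z, ⟨hwz, hlez, hcovz⟩, fun x => (hmz x).trans (hm' x)⟩
  have hBcomp : ∀ (k : Nat) (t : pvSt),
      pvReach info (pvBuildAdj info.length edges) k
        ((PySem.Set.ofList [(0 : Int)] : PySem.Set Int), (1 : Int), (0 : Int)) t →
      t.2.1 ≤ (pvDfs info (pvBuildAdj info.length edges) (2 * info.length + 1)
        (PySem.Set.ofList [(0 : Int)]) 1 0 [] 0).2 := by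
    obtain ⟨K0, hK0, hK0m⟩ := hc4
    rcases hc3 K0 hK0 with h | ⟨s'', hw'', hm'', hle'', hcov''⟩
    · exact nomatch h
    · intro k t hreach
      obtain ⟨t', hG', hsheep⟩ := pvChainBound hadj _ (fun s hs => hs.1) hstepGB hreach
        s'' ⟨hw'', hle'', hcov''⟩ (fun x => (hm'' x).trans (hK0m x)) hWF0
      rw [← hsheep]
      exact hG'.2.1
  have hge : pvAloop info (pvBuildAdj info.length edges) (2 ^ (2 * info.length) + 1)
      [((PySem.Set.ofList [(0 : Int)] : PySem.Set Int), (1 : Int), (0 : Int))] [] 0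
      ≤ (pvDfs info (pvBuildAdj info.length edges) (2 * info.length + 1)
          (PySem.Set.ofList [(0 : Int)]) 1 0 [] 0).2 := by
    refine ie _ hc1 ?_
    intro s hs k t ht
    rw [List.mem_singleton] at hs
    subst hs
    exact hBcomp k t ht
  have hle : (pvDfs info (pvBuildAdj info.length edges) (2 * info.length + 1)
      (PySem.Set.ofList [(0 : Int)]) 1 0 [] 0).2
      ≤ pvAloop info (pvBuildAdj info.length edges) (2 ^ (2 * info.length) + 1)
        [((PySem.Set.ofList [(0 : Int)] : PySem.Set Int), (1 : Int), (0 : Int))] [] 0 :=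
    hc2 _ ib hAcomp
  show solution info edges = solution_alt info edges
  exact le_antisymm hge hle
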